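-- pv_equiv track=rewrite | github.com/eliopuff/battleship-game | recursive-functions.py | compare_help
-- ===== SOURCE A (Python) =====
-- from typing import Any, List
--
-- def compare_help(l1: List[List[int]],
-- l2: List[List[int]], x: int, y: int) -> bool:
--     '''helper function for previous comparing ones. works
--     recursively going over list indexes'''
--     if len(l1[x]) != len(l2[x]):
--         return False
--     if len(l1[x]) == 0 and  len(l2[x]) == 0:
--         return True
--     if y > 0:
--         return compare_help(l1, l2, x, y - 1) and\
--             (l1[x][y] == l2[x][y])
--     return (l1[x][y] == l2[x][y])
-- ===== SOURCE B (Python) =====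
-- def compare_help(l1, l2, x, y):
--     r1, r2 = l1[x], l2[x]
--     if len(r1) != len(r2):
--         return False
--     if not r1:
--         return True
--     if y <= 0:
--         return r1[y] == r2[y]
--     return r1[:y + 1] == r2[:y + 1]
-- ===== Notes on version B (the rewrite author's own statement) =====
-- stated objective: simpler
-- what changed: Replaces the per-index recursion (one stack frame and one re-check of the row lengths per index) by a single prefix-slice comparison r1[:y+1] == r2[:y+1] after the two guards, keeping direct indexing only for the y <= 0 base case.
import Mathlib
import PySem

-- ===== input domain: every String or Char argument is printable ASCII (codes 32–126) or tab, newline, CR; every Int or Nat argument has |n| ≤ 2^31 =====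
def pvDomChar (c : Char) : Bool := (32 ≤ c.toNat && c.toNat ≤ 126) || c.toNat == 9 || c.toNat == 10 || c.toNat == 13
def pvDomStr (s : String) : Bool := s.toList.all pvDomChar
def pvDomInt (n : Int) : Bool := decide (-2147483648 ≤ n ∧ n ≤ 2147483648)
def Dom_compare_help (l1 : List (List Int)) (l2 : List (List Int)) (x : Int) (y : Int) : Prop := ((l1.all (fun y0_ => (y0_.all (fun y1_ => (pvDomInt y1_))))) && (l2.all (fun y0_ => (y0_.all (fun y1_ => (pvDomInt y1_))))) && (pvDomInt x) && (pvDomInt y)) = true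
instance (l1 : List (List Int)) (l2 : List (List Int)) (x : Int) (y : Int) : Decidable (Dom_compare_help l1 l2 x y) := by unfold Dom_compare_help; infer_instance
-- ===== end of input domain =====

-- B replaces A's per-index recursion by one prefix-slice comparison after the same two guards
-- (objective: simpler; equivalence is about the return value on Pre_).

-- ===== PORT A =====
-- l1[x][y] == l2[x][y] with Python indexing; none (= IndexError) mapped to false (excluded by Pre_)
def pvCmpAt (r1 r2 : List Int) (y : Int) : Bool :=
  match PySem.List.pyGet? r1 y, PySem.List.pyGet? r2 y with
  | some a, some b => a == b
  | _, _ => false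

def compare_help (l1 : List (List Int)) (l2 : List (List Int)) (x : Int) (y : Int) : Bool :=
  match PySem.List.pyGet? l1 x, PySem.List.pyGet? l2 x with
  | some r1, some r2 =>
    if r1.length ≠ r2.length then false
    else if r1.length = 0 ∧ r2.length = 0 then true
    else if h : y > 0 then
      compare_help l1 l2 x (y - 1) && pvCmpAt r1 r2 y
    else
      pvCmpAt r1 r2 y
  | _, _ => false
termination_by y.toNat
decreasing_by omega

-- ===== PORT B =====
def compare_help_alt (l1 : List (List Int)) (l2 : List (List Int)) (x : Int) (y : Int) : Bool :=
  match PySem.List.pyGet? l1 x, PySem.List.pyGet? l2 x with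
  | some r1, some r2 =>
    if r1.length ≠ r2.length then false
    else if r1.length = 0 then true
    else if y ≤ 0 then
      match PySem.List.pyGet? r1 y, PySem.List.pyGet? r2 y with
      | some a, some b => a == b
      | _, _ => false
    else
      PySem.List.slice r1 none (some (y + 1)) == PySem.List.slice r2 none (some (y + 1))
  | _, _ => false

-- ===== PRECONDITION & SPEC =====
-- Pre_ excludes exactly the inputs where the Python A raises IndexError: an x outside both lists'
-- index range, a y outside the row for the single base-case comparison (y ≤ 0), and, for y > 0,
-- a y past the end of equal rows (A only reaches the out-of-range index after every comparison succeeded).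
def Pre_compare_help (l1 : List (List Int)) (l2 : List (List Int)) (x : Int) (y : Int) : Prop :=
  PySem.Raise.InRange l1.length x ∧ PySem.Raise.InRange l2.length x ∧
  (let r1 := PySem.List.pyGetD l1 x []
   let r2 := PySem.List.pyGetD l2 x []
   r1.length = r2.length → r1 ≠ [] →
     (if y ≤ 0 then PySem.Raise.InRange r1.length y
      else (y < (r1.length : Int) ∨ r1 ≠ r2)))
instance (l1 : List (List Int)) (l2 : List (List Int)) (x : Int) (y : Int) : Decidable (Pre_compare_help l1 l2 x y) := by unfold Pre_compare_help; infer_instance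

def pvWitness_compare_help : List (List Int) × List (List Int) × Int × Int := ([[1, 2, 3]], [[1, 2, 4]], 0, 2)

def Spec_compare_help (l1 : List (List Int)) (l2 : List (List Int)) (x : Int) (y : Int) (out : Bool) : Prop := out = compare_help_alt l1 l2 x y
instance (l1 : List (List Int)) (l2 : List (List Int)) (x : Int) (y : Int) (out : Bool) : Decidable (Spec_compare_help l1 l2 x y out) := by unfold Spec_compare_help; infer_instance

-- ===== CLAIM (what is proved, stated in full; the proofs are below) =====
def Claim_equal_compare_help : Prop := ∀ (l1 : List (List Int)) (l2 : List (List Int)) (x : Int) (y : Int), Dom_compare_help l1 l2 x y → Pre_compare_help l1 l2 x y → Spec_compare_help l1 l2 x y (compare_help l1 l2 x y)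

-- ===== LEMMAS AND PROOFS =====

theorem pv_pyGet?_of_inRange (xs : List (List Int)) (i : Int) (h : PySem.Raise.InRange xs.length i) :
    ∃ r, PySem.List.pyGet? xs i = some r := by
  rcases hq : PySem.List.pyGet? xs i with _ | r
  · rw [PySem.List.pyGet?_eq_none_iff] at hq
    exact absurd h hq
  · exact ⟨r, rfl⟩

theorem pv_pyGetD_of_some (xs : List (List Int)) (i : Int) (r : List Int)
    (h : PySem.List.pyGet? xs i = some r) : PySem.List.pyGetD xs i [] = r := by
  unfold PySem.List.pyGetD
  rw [h]
  rfl

theorem pv_app_sing (p q : List Int) (a b : Int) :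
    (decide (p = q) && (a == b)) = decide (p ++ [a] = q ++ [b]) := by
  by_cases hpq : p = q
  · subst hpq
    by_cases hab : a = b <;> simp [hab]
  · have hne : ¬ (p ++ [a] = q ++ [b]) := fun he => hpq (List.append_inj' he rfl).1
    simp [hpq, hne]

theorem compare_help_core (l1 l2 : List (List Int)) (x : Int) (r1 r2 : List Int)
    (h1 : PySem.List.pyGet? l1 x = some r1) (h2 : PySem.List.pyGet? l2 x = some r2)
    (hlen : r1.length = r2.length) (hne : r1 ≠ []) :
    ∀ (n : Nat), (n < r1.length ∨ r1 ≠ r2) →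
      compare_help l1 l2 x (n : Int) = decide (r1.take (n + 1) = r2.take (n + 1)) := by
  intro n
  induction n with
  | zero =>
    intro _
    rw [compare_help]
    simp only [h1, h2]
    rw [if_neg (by omega : ¬ r1.length ≠ r2.length)]
    rw [if_neg (by simp only [List.length_eq_zero_iff, not_and]; intro h _; exact hne h)]
    rw [dif_neg (by norm_num : ¬ ((0 : Nat) : Int) > 0)]
    have hne2 : r2 ≠ [] := by
      intro h
      apply hne
      rw [h] at hlen
      simpa using List.eq_nil_of_length_eq_zero (by simpa using hlen)
    obtain ⟨a, t1, rfl⟩ := List.exists_cons_of_ne_nil hne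
    obtain ⟨b, t2, rfl⟩ := List.exists_cons_of_ne_nil hne2
    simp only [pvCmpAt, PySem.List.pyGet?_zero_cons, Nat.cast_zero, List.take_succ_cons, List.take_zero]
    by_cases hab : a = b <;> simp [hab]
  | succ n ih =>
    intro hside
    have ihr := ih (hside.imp (fun h => by omega) id)
    rw [compare_help]
    simp only [h1, h2]
    have hpos : ((n + 1 : Nat) : Int) > 0 := by push_cast; omega
    have hrw : ((n + 1 : Nat) : Int) - 1 = (n : Int) := by push_cast; ring
    rw [if_neg (by omega : ¬ r1.length ≠ r2.length)]
    rw [if_neg (by simp [List.length_eq_zero_iff]; intro h _; exact hne h)]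
    rw [dif_pos hpos, hrw, ihr]
    by_cases hn : n + 1 < r1.length
    · have hn2 : n + 1 < r2.length := hlen ▸ hn
      have hn2 : n + 1 < r2.length := by omega
      have e1 : PySem.List.pyGet? r1 ((n + 1 : Nat) : Int) = some r1[n + 1] := PySem.List.pyGet?_ofNat r1 (n + 1) hn
      have e2 : PySem.List.pyGet? r2 ((n + 1 : Nat) : Int) = some r2[n + 1] := PySem.List.pyGet?_ofNat r2 (n + 1) hn2
      rw [pvCmpAt, e1, e2]
      conv_rhs => rw [List.take_add_one (l := r1) (i := n + 1), List.take_add_one (l := r2) (i := n + 1)]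
      rw [List.getElem?_eq_getElem hn, List.getElem?_eq_getElem hn2]
      simp only [Option.toList_some]
      exact pv_app_sing _ _ _ _
    · -- n+1 ≥ len, so r1 ≠ r2 and both takes are the full lists
      have hrneq : r1 ≠ r2 := hside.resolve_left (by omega)
      have hf1 : r1.take (n + 1) = r1 := List.take_of_length_le (by omega)
      have hf2 : r2.take (n + 1) = r2 := List.take_of_length_le (by omega)
      have hg1 : r1.take (n + 1 + 1) = r1 := List.take_of_length_le (by omega)
      have hg2 : r2.take (n + 1 + 1) = r2 := List.take_of_length_le (by omega)
      rw [hf1, hf2, hg1, hg2]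
      simp [hrneq]


-- ===== VERDICT (by name: the statement is the Claim_ definition above) =====
theorem compare_help_spec : Claim_equal_compare_help := by
  intro l1 l2 x y _ hpre
  unfold Spec_compare_help
  obtain ⟨hx1, hx2, hcond⟩ := hpre
  obtain ⟨r1, h1⟩ := pv_pyGet?_of_inRange l1 x hx1
  obtain ⟨r2, h2⟩ := pv_pyGet?_of_inRange l2 x hx2
  simp only [pv_pyGetD_of_some l1 x r1 h1, pv_pyGetD_of_some l2 x r2 h2] at hcond
  rw [compare_help]
  unfold compare_help_alt
  simp only [h1, h2]
  by_cases hlen : r1.length = r2.length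
  · by_cases hnil : r1.length = 0
    · have hnil2 : r2.length = 0 := by omega
      simp [hlen, hnil2]
    · have hne : r1 ≠ [] := by
        intro h
        exact hnil (by simp [h])
      rw [if_neg (by omega : ¬ r1.length ≠ r2.length),
          if_neg (by omega : ¬ r1.length ≠ r2.length),
          if_neg (by omega : ¬ (r1.length = 0 ∧ r2.length = 0)),
          if_neg hnil]
      by_cases hy : y ≤ 0
      · rw [dif_neg (by omega : ¬ y > 0), if_pos hy]
        simp [pvCmpAt]
      · rw [if_neg hy]
        have hside := hcond hlen hne
        rw [if_neg hy] at hside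
        have hyn : y = ((y.toNat : Nat) : Int) := by omega
        have hA : compare_help l1 l2 x y = decide (r1.take (y.toNat + 1) = r2.take (y.toNat + 1)) := by
          rw [hyn]
          exact compare_help_core l1 l2 x r1 r2 h1 h2 hlen hne y.toNat
            (hside.imp (fun h => by omega) id)
        rw [compare_help] at hA
        simp only [h1, h2] at hA
        rw [if_neg (by omega : ¬ r1.length ≠ r2.length),
            if_neg (by omega : ¬ (r1.length = 0 ∧ r2.length = 0))] at hA
        rw [hA]
        rw [PySem.List.slice_to r1 (by omega : (0:Int) ≤ y + 1),
            PySem.List.slice_to r2 (by omega : (0:Int) ≤ y + 1)]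
        have ht : (y + 1).toNat = y.toNat + 1 := by omega
        rw [ht]
        by_cases hq : r1.take (y.toNat + 1) = r2.take (y.toNat + 1) <;> simp [hq]
  · simp [hlen]
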